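-- pv_equiv track=rewrite | github.com/MaCoredroid/LumoOmni_opensource | stage3_uti/pipeline/stage4_golden_generate.py | _first_label_span
-- ===== SOURCE A (Python) =====
-- from typing import Dict, List, Optional, Tuple
--
-- def _first_label_span(labels: List[int]) -> Optional[Tuple[int, int]]:
--     start = None
--     end = None
--     for idx, val in enumerate(labels):
--         if val != -100 and start is None:
--             start = idx
--         if val != -100:
--             end = idx
--     if start is None or end is None:
--         return None
--     return start, end + 1
-- ===== SOURCE B (Python) =====
-- from typing import List, Optional, Tuple
--
-- def _first_label_span(labels: List[int]) -> Optional[Tuple[int, int]]: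
--     start = None
--     for i, v in enumerate(labels):
--         if v != -100:
--             start = i
--             break
--     if start is None:
--         return None
--     n = len(labels)
--     for k, v in enumerate(reversed(labels)):
--         if v != -100:
--             return start, n - k
-- ===== Notes on version B (the rewrite author's own statement) =====
-- stated objective: simpler
-- what changed: replaces A's single full sweep that keeps updating start/end accumulators with two early-terminating directional scans: forward for the first non-(-100) index, backward over reversed(labels) for the last
import Mathlib
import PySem

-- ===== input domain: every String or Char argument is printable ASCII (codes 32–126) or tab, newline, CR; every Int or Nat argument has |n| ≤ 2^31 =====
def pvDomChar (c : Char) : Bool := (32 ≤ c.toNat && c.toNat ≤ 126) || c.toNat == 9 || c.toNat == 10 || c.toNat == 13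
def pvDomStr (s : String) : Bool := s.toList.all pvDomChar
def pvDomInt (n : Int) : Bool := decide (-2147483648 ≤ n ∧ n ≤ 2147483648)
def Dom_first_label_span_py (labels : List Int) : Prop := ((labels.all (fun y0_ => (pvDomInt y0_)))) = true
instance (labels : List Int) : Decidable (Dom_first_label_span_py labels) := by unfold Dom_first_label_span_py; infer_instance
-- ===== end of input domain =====

-- B replaces A's single full sweep with two early-terminating directional scans (simpler decomposition; same asymptotic cost).


-- ===== PORT A =====
-- the loop: accumulators (start, end), idx counter from enumerate
def pvLoopA : List Int → Nat → Option Int → Option Int → Option Int × Option Int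
  | [], _, s, e => (s, e)
  | v :: rest, idx, s, e =>
    let s' := if v ≠ -100 ∧ s = none then some (idx : Int) else s
    let e' := if v ≠ -100 then some (idx : Int) else e
    pvLoopA rest (idx + 1) s' e'

def first_label_span_py (labels : List Int) : Option (Int × Int) :=
  match pvLoopA labels 0 none none with
  | (some s, some e) => some (s, e + 1)
  | _ => none

-- ===== PORT B =====
-- forward scan with break: first index (counted from i0) whose value ≠ -100
def pvFindFirst : List Int → Nat → Option Nat
  | [], _ => none
  | v :: rest, i => if v ≠ -100 then some i else pvFindFirst rest (i + 1)

def first_label_span_py_alt (labels : List Int) : Option (Int × Int) :=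
  match pvFindFirst labels 0 with
  | none => none
  | some s =>
    match pvFindFirst labels.reverse 0 with
    | some k => some ((s : Int), (labels.length : Int) - (k : Int))
    | none => none   -- Python: backward loop falls through, implicit None (unreachable here)

-- ===== PRECONDITION & SPEC =====
def Spec_first_label_span_py (labels : List Int) (out : Option (Int × Int)) : Prop := out = first_label_span_py_alt labels
instance (labels : List Int) (out : Option (Int × Int)) : Decidable (Spec_first_label_span_py labels out) := by unfold Spec_first_label_span_py; infer_instance

-- ===== CLAIM (what is proved, stated in full; the proofs are below) =====
def Claim_equal_first_label_span_py : Prop := ∀ (labels : List Int), Dom_first_label_span_py labels → Spec_first_label_span_py labels (first_label_span_py labels)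

-- ===== LEMMAS AND PROOFS =====

-- last index ≥ idx (A's `end` accumulation), as a pure function
def pvLastIdx : List Int → Nat → Option Nat
  | [], _ => none
  | v :: rest, idx =>
    match pvLastIdx rest (idx + 1) with
    | some x => some x
    | none => if v ≠ -100 then some idx else none

theorem pvLoopA_fst (l : List Int) : ∀ (idx : Nat) (s e : Option Int),
    (pvLoopA l idx s e).1 = match s with
      | some x => some x
      | none => (pvFindFirst l idx).map (fun n => (n : Int)) := by
  induction l with
  | nil => intro idx s e; cases s <;> simp [pvLoopA, pvFindFirst]
  | cons v rest ih =>
    intro idx s e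
    cases s with
    | some x =>
      simp only [pvLoopA]
      rw [ih]
      simp
    | none =>
      by_cases hv : v = -100 <;> simp only [pvLoopA, pvFindFirst, hv] <;> rw [ih] <;> simp [hv]

theorem pvLoopA_snd (l : List Int) : ∀ (idx : Nat) (s e : Option Int),
    (pvLoopA l idx s e).2 = match pvLastIdx l idx with
      | some x => some ((x : Int))
      | none => e := by
  induction l with
  | nil => intro idx s e; simp [pvLoopA, pvLastIdx]
  | cons v rest ih =>
    intro idx s e
    simp only [pvLoopA, pvLastIdx]
    rw [ih]
    cases pvLastIdx rest (idx + 1) with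
    | some x => simp
    | none => by_cases hv : v = -100 <;> simp [hv]

theorem pvFindFirst_bound (l : List Int) : ∀ (i k : Nat), pvFindFirst l i = some k → i ≤ k ∧ k < i + l.length := by
  induction l with
  | nil => intro i k h; simp [pvFindFirst] at h
  | cons v rest ih =>
    intro i k h
    simp only [pvFindFirst] at h
    by_cases hv : v = -100
    · simp [hv] at h
      have := ih (i + 1) k h
      simp only [List.length_cons]
      omega
    · simp [hv] at h
      simp only [List.length_cons]
      omega

theorem pvFindFirst_append (v : Int) (l : List Int) : ∀ (i : Nat),
    pvFindFirst (l ++ [v]) i = match pvFindFirst l i with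
      | some x => some x
      | none => if v ≠ -100 then some (i + l.length) else none := by
  induction l with
  | nil => intro i; by_cases hv : v = -100 <;> simp [pvFindFirst, hv]
  | cons w rest ih =>
    intro i
    by_cases hw : w = -100
    · simp only [List.cons_append, pvFindFirst, hw]
      rw [ih]
      cases pvFindFirst rest (i + 1) <;> simp <;> ring_nf
    · simp [pvFindFirst, hw]

theorem pvFindFirst_none_iff (l : List Int) : ∀ (i : Nat),
    pvFindFirst l i = none ↔ ∀ v ∈ l, v = -100 := by
  induction l with
  | nil => intro i; simp [pvFindFirst]
  | cons v rest ih =>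
    intro i
    by_cases hv : v = -100 <;> simp [pvFindFirst, hv, ih]

theorem pvLastIdx_rev (l : List Int) : ∀ (idx : Nat),
    pvLastIdx l idx = (pvFindFirst l.reverse 0).map (fun k => idx + (l.length - 1 - k)) := by
  induction l with
  | nil => intro idx; simp [pvLastIdx, pvFindFirst]
  | cons v rest ih =>
    intro idx
    simp only [pvLastIdx, List.reverse_cons]
    rw [ih, pvFindFirst_append]
    cases hk : pvFindFirst rest.reverse 0 with
    | some k =>
      have hb := pvFindFirst_bound _ _ _ hk
      simp only [List.length_reverse] at hb
      simp only [Option.map_some, List.length_cons]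
      congr 1
      omega
    | none =>
      by_cases hv : v = -100 <;>
        simp [hv, List.length_reverse]

theorem first_label_span_py_equal : ∀ (labels : List Int),
    first_label_span_py labels = first_label_span_py_alt labels := by
  intro l
  unfold first_label_span_py first_label_span_py_alt
  have h1 := pvLoopA_fst l 0 none none
  have h2 := pvLoopA_snd l 0 none none
  cases hf : pvFindFirst l 0 with
  | none =>
    simp only [hf] at h1
    rcases hp : pvLoopA l 0 none none with ⟨ps, pe⟩
    rw [hp] at h1
    simp at h1
    rw [h1]
  | some s =>
    have hrev : pvFindFirst l.reverse 0 ≠ none := by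
      intro hc
      rw [pvFindFirst_none_iff] at hc
      have : pvFindFirst l 0 = none := by
        rw [pvFindFirst_none_iff]
        intro v hv; exact hc v (List.mem_reverse.mpr hv)
      simp [this] at hf
    cases hr : pvFindFirst l.reverse 0 with
    | none => exact absurd hr hrev
    | some k =>
      have hb := pvFindFirst_bound _ _ _ hr
      simp only [List.length_reverse] at hb
      rw [pvLastIdx_rev, hr] at h2
      simp only [Option.map_some] at h2
      rcases hp : pvLoopA l 0 none none with ⟨ps, pe⟩
      rw [hp] at h1 h2
      rw [hf] at h1
      simp at h1 h2
      rw [h1, h2]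
      obtain ⟨-, hb2⟩ := hb
      simp
      omega

-- ===== VERDICT (by name: the statement is the Claim_ definition above) =====
theorem first_label_span_py_spec : Claim_equal_first_label_span_py := by
  intro labels _
  unfold Spec_first_label_span_py
  exact first_label_span_py_equal labels
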